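-- pv_equiv track=rewrite | github.com/zuriyaAnsbacher/GRAMM | GR_code/GG_GRAMM/code/chroms_to_GL_oldVersion.py | gl_cartesian_product
-- ===== SOURCE A (Python) =====
-- import itertools
--
-- def gl_cartesian_product(c1, c2, al_types):
--     lst_options = []
--     gl_options = []
--     for types in al_types:
--         lst_types = []
--         for al1 in c1[types]:
--             for al2 in c2[types]:
--                 lst_types.append(str(al1) + '+' + str(al2))
--         lst_options.append(lst_types)
--     for op in itertools.product(*lst_options):
--         gl_options.append(op)
--     return gl_options
-- ===== SOURCE B (Python) =====
-- def gl_cartesian_product(c1, c2, al_types):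
--     # Divide-and-conquer product: build each type's combo list, then merge
--     # halves recursively, concatenating partial tuples (no itertools.product).
--     combos = [[str(a1) + '+' + str(a2) for a1 in c1[t] for a2 in c2[t]]
--               for t in al_types]
--
--     def prod(lists):
--         if not lists:
--             return [()]
--         if len(lists) == 1:
--             return [(x,) for x in lists[0]]
--         mid = len(lists) // 2
--         return [l + r for l in prod(lists[:mid]) for r in prod(lists[mid:])]
--
--     return prod(combos)
-- ===== Notes on version B (the rewrite author's own statement) =====
-- stated objective: alternative
-- what changed: Replaces itertools.product over the per-type combo lists by a recursive divide-and-conquer that halves the list of combo lists and merges the two half-products by tuple concatenation.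
import Mathlib
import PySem

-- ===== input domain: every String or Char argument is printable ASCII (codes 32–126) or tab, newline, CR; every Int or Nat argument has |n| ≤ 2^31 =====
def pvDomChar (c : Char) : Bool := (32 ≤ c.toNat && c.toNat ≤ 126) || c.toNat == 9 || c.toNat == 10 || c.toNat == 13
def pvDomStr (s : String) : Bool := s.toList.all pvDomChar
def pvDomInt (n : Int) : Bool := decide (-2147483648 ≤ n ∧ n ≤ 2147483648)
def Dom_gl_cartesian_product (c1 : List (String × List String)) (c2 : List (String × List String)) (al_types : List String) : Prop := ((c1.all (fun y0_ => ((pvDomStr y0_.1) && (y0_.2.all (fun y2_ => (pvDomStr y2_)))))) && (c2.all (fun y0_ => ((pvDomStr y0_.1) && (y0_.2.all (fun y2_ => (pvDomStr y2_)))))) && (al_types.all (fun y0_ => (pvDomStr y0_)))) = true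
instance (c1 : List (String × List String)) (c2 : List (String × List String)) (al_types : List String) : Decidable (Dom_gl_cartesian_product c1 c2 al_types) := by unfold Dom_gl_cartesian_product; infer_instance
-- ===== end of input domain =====

-- One line: B replaces itertools.product by a divide-and-conquer merge of
-- half-products of the per-type combo lists (objective: alternative algorithm).

-- dict lookup d[k]: first match; Pre_ guarantees the key is present, so the [] default is never hit
def pvDictGet (d : List (String × List String)) (k : String) : List String :=
  match d.find? (fun p => p.1 == k) with
  | some p => p.2
  | none => []

-- ===== PORT A =====
-- the inner two nested loops appending 'str(al1)+"+"+str(al2)'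
def pvCombos (c1 : List (String × List String)) (c2 : List (String × List String)) (t : String) : List String :=
  (pvDictGet c1 t).flatMap (fun a1 => (pvDictGet c2 t).map (fun a2 => a1 ++ "+" ++ a2))

-- itertools.product(*lst_options): first list varies slowest
def pvProduct : List (List String) → List (List String)
  | [] => [[]]
  | l :: ls => l.flatMap (fun x => (pvProduct ls).map (fun r => x :: r))

def gl_cartesian_product (c1 : List (String × List String)) (c2 : List (String × List String)) (al_types : List String) : List (List String) :=
  let lst_options := al_types.map (fun t => pvCombos c1 c2 t)
  pvProduct lst_options

-- ===== PORT B =====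
-- B's recursive prod(lists): halve, recurse, concatenate partial tuples
def pvProdDC (ls : List (List String)) : List (List String) :=
  match ls with
  | [] => [[]]
  | [l] => l.map (fun x => [x])
  | a :: b :: rest =>
    let mid := (a :: b :: rest).length / 2
    (pvProdDC ((a :: b :: rest).take mid)).flatMap
      (fun l => (pvProdDC ((a :: b :: rest).drop mid)).map (fun r => l ++ r))
termination_by ls.length
decreasing_by
  · simp; omega
  · simp; omega

def gl_cartesian_product_alt (c1 : List (String × List String)) (c2 : List (String × List String)) (al_types : List String) : List (List String) :=
  let combos := al_types.map
    (fun t => (pvDictGet c1 t).flatMap (fun a1 => (pvDictGet c2 t).map (fun a2 => a1 ++ "+" ++ a2)))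
  pvProdDC combos

-- ===== PRECONDITION & SPEC =====
-- Pre_ excludes exactly the inputs where Python A raises KeyError: some type in
-- al_types missing from c1 or c2 (B raises there too).
def Pre_gl_cartesian_product (c1 : List (String × List String)) (c2 : List (String × List String)) (al_types : List String) : Prop :=
  (al_types.all (fun t => c1.any (fun p => p.1 == t) && c2.any (fun p => p.1 == t))) = true
instance (c1 : List (String × List String)) (c2 : List (String × List String)) (al_types : List String) : Decidable (Pre_gl_cartesian_product c1 c2 al_types) := by unfold Pre_gl_cartesian_product; infer_instance

def pvWitness_gl_cartesian_product : (List (String × List String)) × (List (String × List String)) × List String :=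
  ([("A", ["1", "2"]), ("B", ["3"])], [("A", ["4"]), ("B", ["5", "6"])], ["A", "B"])

def Spec_gl_cartesian_product (c1 : List (String × List String)) (c2 : List (String × List String)) (al_types : List String) (out : List (List String)) : Prop := out = gl_cartesian_product_alt c1 c2 al_types
instance (c1 : List (String × List String)) (c2 : List (String × List String)) (al_types : List String) (out : List (List String)) : Decidable (Spec_gl_cartesian_product c1 c2 al_types out) := by unfold Spec_gl_cartesian_product; infer_instance

-- ===== CLAIM =====
def Claim_equal_gl_cartesian_product : Prop := ∀ (c1 : List (String × List String)) (c2 : List (String × List String)) (al_types : List String), Dom_gl_cartesian_product c1 c2 al_types → Pre_gl_cartesian_product c1 c2 al_types → Spec_gl_cartesian_product c1 c2 al_types (gl_cartesian_product c1 c2 al_types)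

-- ===== LEMMAS AND PROOFS =====

-- itertools.product splits over list append: tuples of xs ++ ys are the
-- concatenations of a tuple of xs with a tuple of ys, left part slowest
theorem pvProduct_append (xs ys : List (List String)) :
    pvProduct (xs ++ ys)
      = (pvProduct xs).flatMap (fun l => (pvProduct ys).map (fun r => l ++ r)) := by
  induction xs with
  | nil => simp [pvProduct]
  | cons a xs ih =>
    rw [List.cons_append, pvProduct, ih, pvProduct]
    rw [List.flatMap_assoc]
    apply congrArg (fun h => List.flatMap h a)
    funext x
    rw [List.flatMap_map, List.map_flatMap]
    apply congrArg (fun h => List.flatMap h (pvProduct xs))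
    funext l
    simp [Function.comp_def, List.map_map]

-- the divide-and-conquer product computes itertools.product
theorem pvProdDC_eq (ls : List (List String)) : pvProdDC ls = pvProduct ls := by
  induction ls using pvProdDC.induct with
  | case1 => simp [pvProdDC, pvProduct]
  | case2 l =>
    rw [pvProdDC, pvProduct]
    induction l with
    | nil => rfl
    | cons x l ihl => simp only [List.map_cons, List.flatMap_cons, pvProduct, ihl]; rfl
  | case3 a b rest mid ih1 ih2 =>
    rw [pvProdDC]
    rw [ih1, ih2, ← pvProduct_append, List.take_append_drop]

-- ===== VERDICT =====
theorem gl_cartesian_product_spec : Claim_equal_gl_cartesian_product := by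
  intro c1 c2 al_types _ _
  unfold Spec_gl_cartesian_product gl_cartesian_product gl_cartesian_product_alt
  show pvProduct (al_types.map (fun t => pvCombos c1 c2 t))
      = pvProdDC (al_types.map (fun t => pvCombos c1 c2 t))
  rw [pvProdDC_eq]
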